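-- pv_equiv track=rewrite | github.com/fmcarrasco/op_TVDI_daily | modis_func.py | get_bit_error
-- ===== SOURCE A (Python) =====
-- def get_bit_error(array, opt):
--     """
--     Funcion que para cada item en array, lo convierte a
--     formato binario para poder calcular cuales son los
--     que permiten reconocer errores
--     """
--     bad_values = []
--     for item in array:
--         bin_val = str(bin(int(item)))[2:].zfill(8)
--         bit_01 = str(bin_val)[0:2]
--         if opt == 1:
--             if ('10' in bit_01) or ('11' in bit_01):
--                 bad_values.append(item)
--         elif opt == 2:
--             if ('10' in bit_01) or ('11' in bit_01) or ('01' in bit_01):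
--                 bad_values.append(item)
--
--     return bad_values
-- ===== SOURCE B (Python) =====
-- def get_bit_error(array, opt):
--     # Equivalent threshold form: the top-two-bits test on the zero-filled
--     # 8-char binary string is just a numeric threshold on int(item).
--     if opt == 1:
--         threshold = 128
--     elif opt == 2:
--         threshold = 64
--     else:
--         return []
--     return [item for item in array if int(item) >= threshold]
-- ===== Notes on version B (the rewrite author's own statement) =====
-- stated objective: simpler
-- what changed: Replaces the per-item binary-string construction (bin, zfill, substring tests on the top two characters) with a single numeric threshold chosen once from opt (128 for opt==1, 64 for opt==2, nothing kept otherwise) and one comprehension pass.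
import Mathlib
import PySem

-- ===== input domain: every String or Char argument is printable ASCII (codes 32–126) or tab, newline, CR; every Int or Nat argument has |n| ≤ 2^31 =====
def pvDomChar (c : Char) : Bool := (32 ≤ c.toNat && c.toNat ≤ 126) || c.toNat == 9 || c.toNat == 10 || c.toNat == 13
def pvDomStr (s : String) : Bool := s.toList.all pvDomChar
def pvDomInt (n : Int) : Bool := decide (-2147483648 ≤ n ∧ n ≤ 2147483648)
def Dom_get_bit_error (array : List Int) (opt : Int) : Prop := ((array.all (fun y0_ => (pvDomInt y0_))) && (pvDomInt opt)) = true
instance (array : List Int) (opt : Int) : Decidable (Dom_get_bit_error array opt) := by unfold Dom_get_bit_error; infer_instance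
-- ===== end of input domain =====

-- ===== PORT A =====
-- B changes only the per-item test (string construction → numeric threshold); return value proved equal.
def get_bit_error (array : List Int) (opt : Int) : List Int :=
  array.foldl (fun bad_values item =>
    let bin_val := PySem.Chars.zfill (PySem.List.slice (PySem.Int.toBinChars0b item) (some 2) none) 8
    let bit_01 := PySem.List.slice bin_val (some 0) (some 2)
    if opt = 1 then
      if PySem.Chars.isIn ['1','0'] bit_01 || PySem.Chars.isIn ['1','1'] bit_01 then
        bad_values ++ [item]
      else bad_values
    else if opt = 2 then
      if PySem.Chars.isIn ['1','0'] bit_01 || PySem.Chars.isIn ['1','1'] bit_01 ||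
         PySem.Chars.isIn ['0','1'] bit_01 then
        bad_values ++ [item]
      else bad_values
    else bad_values) []

-- ===== PORT B =====
def get_bit_error_alt (array : List Int) (opt : Int) : List Int :=
  if opt = 1 then array.filter (fun item => 128 ≤ item)
  else if opt = 2 then array.filter (fun item => 64 ≤ item)
  else []

-- ===== PRECONDITION & SPEC =====
def Spec_get_bit_error (array : List Int) (opt : Int) (out : List Int) : Prop := out = get_bit_error_alt array opt
instance (array : List Int) (opt : Int) (out : List Int) : Decidable (Spec_get_bit_error array opt out) := by unfold Spec_get_bit_error; infer_instance

-- ===== CLAIM (what is proved, stated in full; the proofs are below) =====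
def Claim_equal_get_bit_error : Prop := ∀ (array : List Int) (opt : Int), Dom_get_bit_error array opt → Spec_get_bit_error array opt (get_bit_error array opt)

-- ===== LEMMAS AND PROOFS =====

-- the two characters A actually inspects, as a function of the item
def pvBit01 (n : Int) : List Char :=
  PySem.List.slice (PySem.Chars.zfill (PySem.List.slice (PySem.Int.toBinChars0b n) (some 2) none) 8) (some 0) (some 2)

lemma pv_head_toDigits_two : ∀ m : Nat, 0 < m → (Nat.toDigits 2 m).head? = some '1' := by
  intro m
  induction m using Nat.strong_induction_on with
  | _ m ih =>
    intro hm
    rcases Nat.lt_or_ge m 2 with h2 | h2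
    · interval_cases m
      rfl
    · rw [Nat.toDigits_of_base_le (by norm_num) h2, List.head?_append]
      rw [ih (m / 2) (by omega) (by omega)]
      rfl

lemma pv_lt_length_toDigits : ∀ (e m : Nat), 2 ^ e ≤ m → e < (Nat.toDigits 2 m).length := by
  intro e
  induction e with
  | zero => intro m _; exact Nat.length_toDigits_pos
  | succ e ih =>
    intro m hm
    have h2 : 2 ≤ m := le_trans (by have := Nat.one_le_two_pow (n := e); omega) hm
    rw [Nat.toDigits_of_base_le (by norm_num) h2, List.length_append]
    have : 2 ^ e ≤ m / 2 := by
      rw [Nat.le_div_iff_mul_le (by norm_num)]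
      calc 2 ^ e * 2 = 2 ^ (e + 1) := by ring
        _ ≤ m := hm
    have := ih (m / 2) this
    simp
    omega

lemma pv_mem_toDigits_two : ∀ m : Nat, ∀ c ∈ Nat.toDigits 2 m, c = '0' ∨ c = '1' := by
  intro m
  induction m using Nat.strong_induction_on with
  | _ m ih =>
    intro c hc
    rcases Nat.lt_or_ge m 2 with h2 | h2
    · rw [Nat.toDigits_of_lt_base h2] at hc
      interval_cases m <;> simp_all [Nat.digitChar]
    · rw [Nat.toDigits_of_base_le (by norm_num) h2] at hc
      rcases List.mem_append.mp hc with h | h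
      · exact ih (m / 2) (by omega) c h
      · rcases Nat.mod_two_eq_zero_or_one m with hm | hm <;> simp [hm] at h <;> simp [h, Nat.digitChar]

lemma pv_isIn_pair_iff (a b c d : Char) :
    PySem.Chars.isIn [a, b] [c, d] = true ↔ (a = c ∧ b = d) := by
  rw [PySem.Chars.isIn_iff_infix]
  constructor
  · intro h
    have := h.eq_of_length (by simp)
    simpa using this
  · rintro ⟨rfl, rfl⟩
    exact List.infix_refl _

lemma pv_take_two_replicate_append (k : Nat) (hk : 2 ≤ k) (l : List Char) :
    (List.replicate k '0' ++ l).take 2 = ['0', '0'] := by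
  obtain ⟨k', rfl⟩ : ∃ k', k = k' + 2 := ⟨k - 2, by omega⟩
  simp [List.replicate_succ]

lemma pv_zfill8 (c : Char) (rest : List Char) (hc1 : c ≠ '+') (hc2 : c ≠ '-') :
    PySem.Chars.zfill (c :: rest) 8 =
      if 8 ≤ (c :: rest).length then c :: rest
      else List.replicate (8 - (c :: rest).length) '0' ++ (c :: rest) := by
  simp only [PySem.Chars.zfill, hc1, hc2, or_self, if_false]
  split_ifs with h h' h' <;> first
    | rfl
    | (exfalso; simp at h h'; omega)

lemma pv_bit01_cases (n : Int) :
    (128 ≤ n ∧ ∃ d, (d = '0' ∨ d = '1') ∧ pvBit01 n = ['1', d]) ∨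
    (64 ≤ n ∧ n < 128 ∧ pvBit01 n = ['0', '1']) ∨
    (¬ 64 ≤ n ∧ ∃ c d, pvBit01 n = [c, d] ∧ c ≠ '1' ∧ ¬(c = '0' ∧ d = '1')) := by
  unfold pvBit01
  by_cases hn : n < 0
  case pos =>
    -- negative item: the sliced string starts with 'b'; never kept
    refine Or.inr (Or.inr ⟨by omega, ?_⟩)
    have hm : 0 < n.natAbs := by omega
    obtain ⟨D, hDdef⟩ : ∃ D, Nat.toDigits 2 n.natAbs = D := ⟨_, rfl⟩
    have hb : PySem.Int.toBinChars0b n = '-' :: '0' :: 'b' :: D := by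
      simp [PySem.Int.toBinChars0b, hn, hDdef]
    have hdrop : PySem.List.slice (PySem.Int.toBinChars0b n) (some 2) none = 'b' :: D := by
      rw [hb]; simp [pysem]
    have htake : ∀ l : List Char,
        PySem.List.slice l (some 0) (some 2) = l.take 2 := by
      intro l; simp [pysem]
    rw [hdrop, htake]
    have hL : 0 < D.length := by rw [← hDdef]; exact Nat.length_toDigits_pos
    rw [pv_zfill8 'b' D (by decide) (by decide)]
    rcases Nat.lt_or_ge D.length 7 with h7 | h7
    · -- padded; first char '0', second '0' or 'b'
      rw [if_neg (by simp; omega)]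
      rcases Nat.lt_or_ge D.length 6 with h6 | h6
      · refine ⟨'0', '0', ?_, by decide, by decide⟩
        exact pv_take_two_replicate_append _ (by simp; omega) _
      · have h6' : (8 : Nat) - ('b' :: D).length = 1 := by simp; omega
        rw [h6']
        exact ⟨'0', 'b', rfl, by decide, fun h => absurd h.2 (by decide)⟩
    · -- no padding; first char 'b'
      rw [if_pos (by simp; omega)]
      obtain ⟨d, rest, hD⟩ : ∃ d rest, D = d :: rest := by
        cases D with
        | nil => simp at hL
        | cons d rest => exact ⟨d, rest, rfl⟩
      subst hD
      exact ⟨'b', d, rfl, by decide, fun h => absurd h.1 (by decide)⟩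
  case neg =>
    obtain ⟨D, hDdef⟩ : ∃ D, Nat.toDigits 2 n.toNat = D := ⟨_, rfl⟩
    have hb : PySem.Int.toBinChars0b n = '0' :: 'b' :: D := by
      simp [PySem.Int.toBinChars0b, hn, hDdef]
    have hdrop : PySem.List.slice (PySem.Int.toBinChars0b n) (some 2) none = D := by
      rw [hb]; simp [pysem]
    have htake : ∀ l : List Char,
        PySem.List.slice l (some 0) (some 2) = l.take 2 := by
      intro l; simp [pysem]
    rw [hdrop, htake]
    have hL : 0 < D.length := by rw [← hDdef]; exact Nat.length_toDigits_pos
    obtain ⟨c, rest, hD⟩ : ∃ c rest, D = c :: rest := by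
      cases D with
      | nil => simp at hL
      | cons c rest => exact ⟨c, rest, rfl⟩
    subst hD
    have hcd : c = '0' ∨ c = '1' :=
      pv_mem_toDigits_two n.toNat c (by rw [hDdef]; exact List.mem_cons_self)
    rw [pv_zfill8 c rest (by rcases hcd with rfl | rfl <;> decide)
          (by rcases hcd with rfl | rfl <;> decide)]
    by_cases h128 : 128 ≤ n
    · -- 8 binary digits or more: first char is '1'
      have h8 : 8 ≤ (c :: rest).length := by
        rw [← hDdef]; exact pv_lt_length_toDigits 7 n.toNat (by omega)
      rw [if_pos h8]
      have hc1 : c = '1' := by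
        have hh := pv_head_toDigits_two n.toNat (by omega)
        rw [hDdef] at hh
        simpa using hh
      obtain ⟨d, rest2, hrest⟩ : ∃ d rest2, rest = d :: rest2 := by
        cases rest with
        | nil => simp at h8
        | cons d rest2 => exact ⟨d, rest2, rfl⟩
      subst hrest hc1
      refine Or.inl ⟨h128, d, ?_, rfl⟩
      exact pv_mem_toDigits_two n.toNat d (by rw [hDdef]; simp)
    · by_cases h64 : 64 ≤ n
      · -- exactly 7 binary digits: one pad zero, then the leading '1'
        have h7 : 6 < (c :: rest).length := by
          rw [← hDdef]; exact pv_lt_length_toDigits 6 n.toNat (by omega)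
        have h7' : (c :: rest).length ≤ 7 := by
          rw [← hDdef]; exact Nat.toDigits_length 2 n.toNat 7 (by norm_num) (by omega)
        rw [if_neg (by omega)]
        have hc1 : c = '1' := by
          have hh := pv_head_toDigits_two n.toNat (by omega)
          rw [hDdef] at hh
          simpa using hh
        subst hc1
        refine Or.inr (Or.inl ⟨h64, by omega, ?_⟩)
        have he : (8 : Nat) - ('1' :: rest).length = 1 := by simp at h7 h7' ⊢; omega
        rw [he]
        rfl
      · -- at most 6 binary digits: two pad zeros in front
        have h6 : (c :: rest).length ≤ 6 := by
          rw [← hDdef]; exact Nat.toDigits_length 2 n.toNat 6 (by norm_num) (by omega)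
        rw [if_neg (by omega)]
        refine Or.inr (Or.inr ⟨h64, '0', '0',
          pv_take_two_replicate_append _ (by omega) _, by decide, by decide⟩)

lemma pv_keep1_eq (n : Int) :
    (PySem.Chars.isIn ['1','0'] (pvBit01 n) || PySem.Chars.isIn ['1','1'] (pvBit01 n))
      = decide (128 ≤ n) := by
  rcases pv_bit01_cases n with ⟨h, d, hd, hb⟩ | ⟨h1, h2, hb⟩ | ⟨h, c, d, hb, hc, hcd⟩
  · rcases hd with rfl | rfl <;> simp [hb, h, Bool.or_eq_true, pv_isIn_pair_iff]
  · have hx : ¬ (128 ≤ n) := by omega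
    rw [Bool.eq_iff_iff]
    simp [hb, Bool.or_eq_true, pv_isIn_pair_iff, hx]
  · have hx : ¬ (128 ≤ n) := by omega
    rw [Bool.eq_iff_iff]
    simp only [hb, Bool.or_eq_true, pv_isIn_pair_iff]
    constructor
    · rintro (⟨rfl, rfl⟩ | ⟨rfl, rfl⟩) <;> exact absurd rfl hc
    · intro hh; exact absurd (of_decide_eq_true hh) hx

lemma pv_keep2_eq (n : Int) :
    (PySem.Chars.isIn ['1','0'] (pvBit01 n) || PySem.Chars.isIn ['1','1'] (pvBit01 n) ||
     PySem.Chars.isIn ['0','1'] (pvBit01 n)) = decide (64 ≤ n) := by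
  rcases pv_bit01_cases n with ⟨h, d, hd, hb⟩ | ⟨h1, h2, hb⟩ | ⟨h, c, d, hb, hc, hcd⟩
  · have hx : (64 : Int) ≤ n := by omega
    rcases hd with rfl | rfl <;> simp [hb, hx, Bool.or_eq_true, pv_isIn_pair_iff]
  · simp [hb, h1, Bool.or_eq_true, pv_isIn_pair_iff]
  · rw [Bool.eq_iff_iff]
    simp only [hb, Bool.or_eq_true, pv_isIn_pair_iff]
    constructor
    · rintro ((⟨rfl, rfl⟩ | ⟨rfl, rfl⟩) | ⟨rfl, rfl⟩)
      · exact absurd rfl hc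
      · exact absurd rfl hc
      · exact absurd ⟨rfl, rfl⟩ hcd
    · intro hh; exact absurd (of_decide_eq_true hh) h

-- ===== VERDICT (by name: the statement is the Claim_ definition above) =====
theorem get_bit_error_spec : Claim_equal_get_bit_error := by
  intro array opt hdom
  clear hdom
  unfold Spec_get_bit_error get_bit_error get_bit_error_alt
  by_cases h1 : opt = 1
  · subst h1
    show List.foldl (fun bad_values item =>
        if (1 : Int) = 1 then
          if (PySem.Chars.isIn ['1','0'] (pvBit01 item) || PySem.Chars.isIn ['1','1'] (pvBit01 item)) = true then
            bad_values ++ [item]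
          else bad_values
        else if (1 : Int) = 2 then
          if (PySem.Chars.isIn ['1','0'] (pvBit01 item) || PySem.Chars.isIn ['1','1'] (pvBit01 item) ||
              PySem.Chars.isIn ['0','1'] (pvBit01 item)) = true then
            bad_values ++ [item]
          else bad_values
        else bad_values) [] array =
      if (1 : Int) = 1 then array.filter (fun item => decide (128 ≤ item))
      else if (1 : Int) = 2 then array.filter (fun item => decide (64 ≤ item))
      else []
    have hfun : (fun (bad_values : List Int) (item : Int) =>
        if (1 : Int) = 1 then
          if (PySem.Chars.isIn ['1','0'] (pvBit01 item) || PySem.Chars.isIn ['1','1'] (pvBit01 item)) = true then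
            bad_values ++ [item]
          else bad_values
        else if (1 : Int) = 2 then
          if (PySem.Chars.isIn ['1','0'] (pvBit01 item) || PySem.Chars.isIn ['1','1'] (pvBit01 item) ||
              PySem.Chars.isIn ['0','1'] (pvBit01 item)) = true then
            bad_values ++ [item]
          else bad_values
        else bad_values) =
        fun bad_values item => if decide (128 ≤ item) = true then bad_values ++ [item] else bad_values := by
      funext bad item
      rw [if_pos rfl, pv_keep1_eq]
    rw [hfun, PySem.List.foldl_append_if (fun item : Int => decide (128 ≤ item)) (fun x : Int => x) array [],
        if_pos rfl]
    simp
  · by_cases h2 : opt = 2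
    · subst h2
      show List.foldl (fun bad_values item =>
          if (2 : Int) = 1 then
            if (PySem.Chars.isIn ['1','0'] (pvBit01 item) || PySem.Chars.isIn ['1','1'] (pvBit01 item)) = true then
              bad_values ++ [item]
            else bad_values
          else if (2 : Int) = 2 then
            if (PySem.Chars.isIn ['1','0'] (pvBit01 item) || PySem.Chars.isIn ['1','1'] (pvBit01 item) ||
                PySem.Chars.isIn ['0','1'] (pvBit01 item)) = true then
              bad_values ++ [item]
            else bad_values
          else bad_values) [] array =
        if (2 : Int) = 1 then array.filter (fun item => decide (128 ≤ item))
        else if (2 : Int) = 2 then array.filter (fun item => decide (64 ≤ item))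
        else []
      have hfun : (fun (bad_values : List Int) (item : Int) =>
          if (2 : Int) = 1 then
            if (PySem.Chars.isIn ['1','0'] (pvBit01 item) || PySem.Chars.isIn ['1','1'] (pvBit01 item)) = true then
              bad_values ++ [item]
            else bad_values
          else if (2 : Int) = 2 then
            if (PySem.Chars.isIn ['1','0'] (pvBit01 item) || PySem.Chars.isIn ['1','1'] (pvBit01 item) ||
                PySem.Chars.isIn ['0','1'] (pvBit01 item)) = true then
              bad_values ++ [item]
            else bad_values
          else bad_values) =
          fun bad_values item => if decide (64 ≤ item) = true then bad_values ++ [item] else bad_values := by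
        funext bad item
        rw [if_neg (by norm_num), if_pos rfl, pv_keep2_eq]
      rw [hfun, PySem.List.foldl_append_if (fun item : Int => decide (64 ≤ item)) (fun x : Int => x) array [],
          if_neg (by norm_num), if_pos rfl]
      simp
    · show List.foldl (fun bad_values item =>
          if opt = 1 then
            if (PySem.Chars.isIn ['1','0'] (pvBit01 item) || PySem.Chars.isIn ['1','1'] (pvBit01 item)) = true then
              bad_values ++ [item]
            else bad_values
          else if opt = 2 then
            if (PySem.Chars.isIn ['1','0'] (pvBit01 item) || PySem.Chars.isIn ['1','1'] (pvBit01 item) ||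
                PySem.Chars.isIn ['0','1'] (pvBit01 item)) = true then
              bad_values ++ [item]
            else bad_values
          else bad_values) [] array =
        if opt = 1 then array.filter (fun item => decide (128 ≤ item))
        else if opt = 2 then array.filter (fun item => decide (64 ≤ item))
        else []
      simp only [if_neg h1, if_neg h2]
      induction array with
      | nil => rfl
      | cons x xs ih => exact ih
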